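-- pv_equiv track=rewrite | github.com/WhoTookJonty/PersonalProjects | GoogleFoobar/bunny.py | solution
-- ===== SOURCE A (Python) =====
-- def solution(x, y):
--     tmpX = x
--     tmpY = y
--
-- #Find which diagonal you are in
--     while tmpX != 1:
--         tmpY += 1
--         tmpX -= 1
--
--     #The Lazy caterer's sequence is a recurrence relation of the form f(n) = n + f(n-1), where n = number of cuts,
--     # or in this case the diagonal number. Uses zero indexing.
--     n = tmpY - 1
--     startDigit = int(((n*n)+n+2)/2)
--     ans = startDigit + (tmpY - y)
--
--     return str(ans)
-- ===== SOURCE B (Python) =====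
-- def solution(x, y):
--     # Diagonal number via the lazy caterer closed form, no walking loop:
--     # stepping (x-1) times from (x, y) up the diagonal lands on (1, x + y - 1).
--     n = x + y - 2
--     return str(int((n * n + n + 2) / 2) + (x - 1))
-- ===== Notes on version B (the rewrite author's own statement) =====
-- stated objective: faster
-- what changed: B replaces A's O(x) while-loop that walks the diagonal one cell at a time by the closed form n = x + y - 2 and evaluates the same lazy-caterer formula directly.
import Mathlib
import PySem

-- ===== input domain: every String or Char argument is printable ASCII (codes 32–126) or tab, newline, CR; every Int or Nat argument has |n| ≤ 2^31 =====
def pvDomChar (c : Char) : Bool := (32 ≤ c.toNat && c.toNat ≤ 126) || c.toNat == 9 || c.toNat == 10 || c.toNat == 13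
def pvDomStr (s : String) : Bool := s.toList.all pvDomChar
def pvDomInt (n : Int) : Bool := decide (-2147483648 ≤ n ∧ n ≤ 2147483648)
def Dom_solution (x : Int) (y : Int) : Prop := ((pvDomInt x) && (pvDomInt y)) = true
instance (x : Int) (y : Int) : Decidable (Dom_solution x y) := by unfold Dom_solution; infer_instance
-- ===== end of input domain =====

-- B replaces A's O(x) diagonal-walking loop by the closed form n = x + y - 2,
-- evaluating the same lazy-caterer formula (including its float division) in O(1).


-- Shared float primitive (PySem has no floats): the IEEE-754 double nearest
-- (ties-to-even) to the positive integer m — exactly what CPython's int/int true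
-- division `(n*n+n+2)/2` produces here, since the exact quotient is the integer m;
-- `int()` of that integer-valued double is then the identity on it. Exact for every
-- int input of either program.
def pvRound53 (m : Nat) : Nat :=
  if Nat.log2 m + 1 ≤ 53 then m
  else
    let k := Nat.log2 m + 1 - 53
    let t := m >>> k
    let r := m % 2 ^ k
    let half := 2 ^ (k - 1)
    let t' := if half < r ∨ (r = half ∧ t % 2 = 1) then t + 1 else t
    t' <<< k

-- ===== PORT A =====
-- the `while tmpX != 1: tmpY += 1; tmpX -= 1` loop; fuel x.toNat suffices whenever
-- the Python loop terminates (x ≥ 1); for x ≤ 0 Python diverges (outside Pre_).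
def solutionGo : Nat → Int → Int → Int
  | 0, _, tmpY => tmpY
  | fuel + 1, tmpX, tmpY =>
    if tmpX = 1 then tmpY else solutionGo fuel (tmpX - 1) (tmpY + 1)

def solution (x : Int) (y : Int) : String :=
  let tmpY := solutionGo x.toNat x y
  let n := tmpY - 1
  -- int(((n*n)+n+2)/2): the numerator is positive and even, so the exact quotient is
  -- a positive integer and the float division returns its 53-bit rounding; ported by
  -- hand via pvRound53 (exact, see its comment).
  let startDigit : Int := Int.ofNat (pvRound53 ((n * n + n + 2) / 2).toNat)
  let ans := startDigit + (tmpY - y)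
  PySem.Int.toStr ans

-- ===== PORT B =====
def solution_alt (x : Int) (y : Int) : String :=
  let n := x + y - 2
  -- int((n*n+n+2)/2): same hand-ported float division as in A's formula (exact).
  PySem.Int.toStr (Int.ofNat (pvRound53 ((n * n + n + 2) / 2).toNat) + (x - 1))

-- ===== PRECONDITION & SPEC =====
-- Pre_ excludes x ≤ 0, where A's while-loop never terminates (tmpX only decreases).
def Pre_solution (x : Int) (y : Int) : Prop := 1 ≤ x
instance (x : Int) (y : Int) : Decidable (Pre_solution x y) := by unfold Pre_solution; infer_instance
def pvWitness_solution : Int × Int := (3, 2)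
def Spec_solution (x : Int) (y : Int) (out : String) : Prop := out = solution_alt x y
instance (x : Int) (y : Int) (out : String) : Decidable (Spec_solution x y out) := by unfold Spec_solution; infer_instance

-- ===== CLAIM (what is proved, stated in full; the proofs are below) =====
def Claim_equal_solution : Prop := ∀ (x : Int) (y : Int), Dom_solution x y → Pre_solution x y → Spec_solution x y (solution x y)

-- ===== LEMMAS AND PROOFS =====
theorem solutionGo_closed (fuel : Nat) : ∀ (tmpX tmpY : Int), 1 ≤ tmpX → tmpX ≤ fuel →
    solutionGo fuel tmpX tmpY = tmpY + (tmpX - 1) := by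
  induction fuel with
  | zero => intro tmpX tmpY h1 h2; omega
  | succ f ih =>
    intro tmpX tmpY h1 h2
    by_cases hx : tmpX = 1
    · simp [solutionGo, hx]
    · rw [show solutionGo (f + 1) tmpX tmpY = solutionGo f (tmpX - 1) (tmpY + 1) by
        simp [solutionGo, hx]]
      rw [ih (tmpX - 1) (tmpY + 1) (by omega) (by push_cast at h2 ⊢; omega)]
      ring

-- ===== VERDICT (by name: the statement is the Claim_ definition above) =====
theorem solution_spec : Claim_equal_solution := by
  unfold Claim_equal_solution Spec_solution Pre_solution
  intro x y _ hx
  have hgo : solutionGo x.toNat x y = y + (x - 1) :=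
    solutionGo_closed x.toNat x y hx (by omega)
  simp only [solution, solution_alt, hgo]
  have hn : y + (x - 1) - 1 = x + y - 2 := by ring
  rw [hn]
  congr 1
  ring
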